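-- pv_equiv track=rewrite | github.com/i71924/sc_projects | sc_projects/SC001/similarity/similarity_ext.py | find_homology
-- ===== SOURCE A (Python) =====
-- def find_homology(long_seq, short_seq):
--     """
--     :param long_seq: str, the base DNA sequence user wants to search in
--     :param short_seq: str, the DNA sequence user wants to match
--     :return: the homology in long_seq
--     """
--     homology = ''
--     similarity = 0
--     for i in range(len(long_seq) - len(short_seq) + 1):
--         # Search from [0] to [long_seq - short_seq] in long_seq
--         new_homology = ''
--         new_similarity = 0
--         for j in range(i, i + len(short_seq)):
--             # Get the similarity of short_seq and the string from long_seq[i] to long_seq[i+len(short_seq)-1]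
--             if long_seq[j] == short_seq[j - i]:
--                 # The two DNA match and should add up similarity
--                 new_similarity += 1
--             else:
--                 pass
--         if new_similarity > similarity:
--             # The new DNA section in long_seq has more similarity and should replace the homology
--             similarity = new_similarity
--             for k in range(i, i + len(short_seq)):
--                 # Assign new homology
--                 new_homology += long_seq[k]
--             homology = new_homology
--     return homology
-- ===== SOURCE B (Python) =====
-- def _bisect_left(a, x):
--     """leftmost insertion point of x in sorted list a (hand-rolled: A imports nothing)"""
--     lo, hi = 0, len(a)
--     while lo < hi:
--         mid = (lo + hi) // 2
--         if a[mid] < x: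
--             lo = mid + 1
--         else:
--             hi = mid
--     return lo
--
--
-- def find_homology(long_seq, short_seq):
--     """
--     :param long_seq: str, the base DNA sequence user wants to search in
--     :param short_seq: str, the DNA sequence user wants to match
--     :return: the homology in long_seq
--     """
--     n, m = len(long_seq), len(short_seq)
--     width = n - m + 1
--     if width <= 0:
--         return ''
--     # index the long sequence: character -> sorted list of positions
--     pos = {}
--     for j, c in enumerate(long_seq):
--         pos.setdefault(c, []).append(j)
--     # scatter-add: short_seq[p] matches long_seq[j] for every j in pos[c];
--     # only j with p <= j < p + width lands in a window, so clip by binary search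
--     counts = [0] * width
--     for p, c in enumerate(short_seq):
--         lst = pos.get(c, [])
--         lo = _bisect_left(lst, p)
--         hi = _bisect_left(lst, p + width)
--         for j in lst[lo:hi]:
--             counts[j - p] += 1
--     best = max(counts)
--     if best == 0:
--         return ''
--     i = counts.index(best)
--     return long_seq[i:i + m]
-- ===== Notes on version B (the rewrite author's own statement) =====
-- stated objective: alternative
-- what changed: Replaces A's nested compare-every-window loops by a character-to-sorted-positions index of long_seq, a hand-rolled binary search that clips each position list to the offsets that fall in a window, a scatter-add of those matches into a per-offset counts array, and a single max/first-index selection instead of A's interleaved strict-improvement update and char-by-char window rebuild.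
import Mathlib
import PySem

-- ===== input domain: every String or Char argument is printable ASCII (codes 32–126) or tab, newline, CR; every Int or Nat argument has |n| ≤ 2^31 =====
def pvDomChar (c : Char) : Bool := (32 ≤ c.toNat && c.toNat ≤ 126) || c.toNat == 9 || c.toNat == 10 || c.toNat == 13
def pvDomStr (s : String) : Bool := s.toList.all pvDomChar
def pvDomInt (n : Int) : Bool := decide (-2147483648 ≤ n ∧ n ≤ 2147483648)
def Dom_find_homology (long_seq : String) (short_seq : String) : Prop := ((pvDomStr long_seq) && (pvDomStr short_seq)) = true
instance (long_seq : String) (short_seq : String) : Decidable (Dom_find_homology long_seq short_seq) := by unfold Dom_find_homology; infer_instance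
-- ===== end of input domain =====

-- B replaces A's nested compare-every-window loops by a character→sorted-positions index of
-- long_seq, binary-search clipping of each position list to the in-window offsets, a scatter-add
-- into a per-offset counts array, and one max/first-index selection (objective: alternative).

-- ===== PORT A =====
-- All indexing in A is in range (i ∈ [0, n-m], j ∈ [i, i+m)), so pyGetD is exact here.
def find_homology (long_seq : String) (short_seq : String) : String :=
  let l := long_seq.toList
  let s := short_seq.toList
  let res : List Char × Int :=
    (PySem.List.pyRange 0 ((l.length : Int) - (s.length : Int) + 1) 1).foldl
      (fun st i =>
        let new_similarity : Int :=
          (PySem.List.pyRange i (i + (s.length : Int)) 1).foldl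
            (fun acc j =>
              if PySem.List.pyGetD l j ' ' = PySem.List.pyGetD s (j - i) ' ' then acc + 1 else acc)
            0
        if new_similarity > st.2 then
          let new_homology : List Char :=
            (PySem.List.pyRange i (i + (s.length : Int)) 1).foldl
              (fun acc k => acc ++ [PySem.List.pyGetD l k ' ']) []
          (new_homology, new_similarity)
        else st)
      ([], 0)
  String.ofList res.1

-- ===== PORT B =====
-- _bisect_left's lo/hi are Python ints confined to [0, len(a)], ported as Nat; (lo+hi)//2 is Nat division, exact here.
def bleft_loop (a : List Int) (x : Int) (lo hi : Nat) : Nat :=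
  if h : lo < hi then
    let mid := (lo + hi) / 2
    if PySem.List.pyGetD a (mid : Int) 0 < x then bleft_loop a x (mid + 1) hi
    else bleft_loop a x lo mid
  else lo
termination_by hi - lo
decreasing_by all_goals omega

def bisect_left (a : List Int) (x : Int) : Nat := bleft_loop a x 0 a.length

-- counts[j - p] += 1 is ported as set/getD: the bisect bounds keep p ≤ j < p + width, so the index is in range and exact.
def find_homology_alt (long_seq : String) (short_seq : String) : String :=
  let l := long_seq.toList
  let s := short_seq.toList
  let width : Int := (l.length : Int) - (s.length : Int) + 1
  if width ≤ 0 then ""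
  else
    let pos : PySem.Dict Char (List Int) :=
      (PySem.List.enumerate l 0).foldl
        (fun d jc => d.modify jc.2 [] (· ++ [jc.1])) PySem.Dict.empty
    let counts : List Int :=
      (PySem.List.enumerate s 0).foldl
        (fun cs pc =>
          let lst := pos.getD pc.2 []
          let lo := bisect_left lst pc.1
          let hi := bisect_left lst (pc.1 + width)
          (PySem.List.slice lst (some ((lo : Nat) : Int)) (some ((hi : Nat) : Int))).foldl
            (fun cs j => cs.set (j - pc.1).toNat (cs.getD (j - pc.1).toNat 0 + 1)) cs)
        (List.replicate width.toNat 0)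
    match PySem.List.max? counts (fun x => x) with
    | none => ""
    | some best =>
      if best = 0 then ""
      else
        match PySem.List.index? counts best with
        | none => ""
        | some i =>
          String.ofList (PySem.List.slice l (some (i : Int)) (some ((i : Int) + (s.length : Int))))

-- ===== PRECONDITION & SPEC =====
def Spec_find_homology (long_seq : String) (short_seq : String) (out : String) : Prop := out = find_homology_alt long_seq short_seq
instance (long_seq : String) (short_seq : String) (out : String) : Decidable (Spec_find_homology long_seq short_seq out) := by unfold Spec_find_homology; infer_instance

-- ===== CLAIM (what is proved, stated in full; the proofs are below) =====
def Claim_equal_find_homology : Prop := ∀ (long_seq : String) (short_seq : String), Dom_find_homology long_seq short_seq → Spec_find_homology long_seq short_seq (find_homology long_seq short_seq)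

-- ===== LEMMAS AND PROOFS =====

/-- number of matching positions of the window of `l` at offset `k` against `s` -/
def mcount (l s : List Char) (k : Nat) : Nat :=
  (List.range s.length).countP (fun p => decide (l.getD (k + p) ' ' = s.getD p ' '))

def window (l s : List Char) (k : Nat) : List Char := (l.drop k).take s.length

/-- the per-offset match counts for offsets < t -/
def cntList (l s : List Char) (t : Nat) : List Int :=
  (List.range t).map (fun k => (mcount l s k : Int))

def bigM (l s : List Char) (t : Nat) : Int := (cntList l s t).foldl max 0

def bigH (l s : List Char) (t : Nat) : List Char :=
  if 0 < bigM l s t then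
    match PySem.List.index? (cntList l s t) (bigM l s t) with
    | some i => window l s i
    | none => []
  else []

def stepA (l s : List Char) (st : List Char × Int) (k : Nat) : List Char × Int :=
  if (mcount l s k : Int) > st.2 then (window l s k, (mcount l s k : Int)) else st

lemma bigM_nonneg (l s : List Char) (t : Nat) : 0 ≤ bigM l s t :=
  (PySem.List.le_foldl_max _ 0).1

lemma mem_cntList_le (l s : List Char) (t : Nat) {x : Int} (hx : x ∈ cntList l s t) :
    x ≤ bigM l s t := (PySem.List.le_foldl_max _ 0).2 x hx

lemma map_getD_range (l : List Char) (k m : Nat) (h : k + m ≤ l.length) :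
    (List.range m).map (fun p => l.getD (k + p) ' ') = (l.drop k).take m := by
  apply List.ext_getElem
  · simp; omega
  · intro i h1 h2
    simp only [List.getElem_map, List.getElem_range, List.getElem_take, List.getElem_drop]
    rw [List.getD_eq_getElem?_getD, List.getElem?_eq_getElem (by simp at h1 ⊢; omega)]
    simp

lemma cntList_succ (l s : List Char) (t : Nat) :
    cntList l s (t + 1) = cntList l s t ++ [(mcount l s t : Int)] := by
  unfold cntList
  rw [List.range_succ, List.map_append]
  rfl

lemma bigM_succ (l s : List Char) (t : Nat) :
    bigM l s (t + 1) = max (bigM l s t) (mcount l s t : Int) := by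
  unfold bigM
  rw [cntList_succ, List.foldl_append]
  rfl

lemma A_loop (l s : List Char) (t : Nat) :
    (List.range t).foldl (stepA l s) ([], 0) = (bigH l s t, bigM l s t) := by
  induction t with
  | zero => simp [bigH, bigM, cntList]
  | succ t ih =>
    rw [List.range_succ, List.foldl_append, ih]
    show stepA l s (bigH l s t, bigM l s t) t = _
    unfold stepA
    by_cases hc : (mcount l s t : Int) > bigM l s t
    · rw [if_pos hc]
      have hM : bigM l s (t + 1) = (mcount l s t : Int) := by
        rw [bigM_succ]; omega
      have hnm : (mcount l s t : Int) ∉ cntList l s t := by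
        intro hm
        exact absurd (mem_cntList_le l s t hm) (by omega)
      have hidx : PySem.List.index? (cntList l s (t + 1)) (bigM l s (t + 1))
          = some (cntList l s t).length := by
        rw [cntList_succ, hM]
        exact PySem.List.index?_append_singleton_self _ _ hnm
      have hlen : (cntList l s t).length = t := by simp [cntList]
      have hpos : 0 < bigM l s (t + 1) := by
        have := bigM_nonneg l s t; omega
      unfold bigH
      rw [if_pos hpos, hidx, hlen, hM]
    · rw [if_neg hc]
      have hM : bigM l s (t + 1) = bigM l s t := by rw [bigM_succ]; omega
      unfold bigH
      rw [hM]
      by_cases hpos : 0 < bigM l s t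
      · have hmem : bigM l s t ∈ cntList l s t := by
          rcases PySem.List.foldl_max_mem (cntList l s t) 0 with h0 | hm
          · exact absurd (show bigM l s t = 0 from h0) (by omega)
          · exact hm
        have hidx : PySem.List.index? (cntList l s (t + 1)) (bigM l s t)
            = PySem.List.index? (cntList l s t) (bigM l s t) := by
          rw [cntList_succ]
          exact PySem.List.index?_append_of_mem _ hmem
        rw [if_pos hpos, if_pos hpos, hidx]
      · rw [if_neg hpos, if_neg hpos]

lemma max?_nonneg_list (xs : List Int) (hne : xs ≠ []) (hpos : ∀ x ∈ xs, 0 ≤ x) :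
    PySem.List.max? xs (fun y => y) = some (xs.foldl max 0) := by
  obtain ⟨x, t, rfl⟩ := List.exists_cons_of_ne_nil hne
  rw [PySem.List.max?_id_cons, List.foldl_cons]
  have : max 0 x = x := max_eq_right (hpos x (by simp))
  rw [this]

lemma inner_count (l s : List Char) (k : Nat) (_hk : k + s.length ≤ l.length) :
    (PySem.List.pyRange (k : Int) ((k : Int) + (s.length : Int)) 1).foldl
      (fun acc j =>
        if PySem.List.pyGetD l j ' ' = PySem.List.pyGetD s (j - (k : Int)) ' ' then acc + 1 else acc)
      0 = (mcount l s k : Int) := by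
  rw [PySem.List.pyRange_one, List.foldl_map]
  rw [PySem.List.foldl_ite_add_one
    (fun (p : Nat) => PySem.List.pyGetD l ((k : Int) + (p : Int)) ' ' = PySem.List.pyGetD s (((k : Int) + (p : Int)) - (k : Int)) ' ')]
  have harg : ((k : Int) + (s.length : Int) - (k : Int)).toNat = s.length := by omega
  rw [harg]
  unfold mcount
  norm_num
  apply List.countP_congr
  intro p hp
  rw [List.mem_range] at hp
  have h1 : (k : Int) + (p : Int) = ((k + p : Nat) : Int) := by push_cast; ring
  rw [h1, PySem.List.pyGetD_natCast, List.getD_eq_getElem?_getD]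

lemma inner_build (l s : List Char) (k : Nat) (hk : k + s.length ≤ l.length) :
    (PySem.List.pyRange (k : Int) ((k : Int) + (s.length : Int)) 1).foldl
      (fun acc j => acc ++ [PySem.List.pyGetD l j ' ']) [] = window l s k := by
  rw [PySem.List.pyRange_one, List.foldl_map,
      PySem.List.foldl_append_singleton_eq_map (fun (p : Nat) => PySem.List.pyGetD l ((k : Int) + (p : Int)) ' ')]
  have harg : ((k : Int) + (s.length : Int) - (k : Int)).toNat = s.length := by omega
  rw [harg, List.nil_append]
  unfold window
  rw [← map_getD_range l k s.length hk]
  apply List.map_congr_left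
  intro p hp
  rw [List.mem_range] at hp
  have h1 : (k : Int) + (p : Int) = ((k + p : Nat) : Int) := by push_cast; ring
  rw [h1, PySem.List.pyGetD_natCast]

lemma sorted_getD_mono (a : List Int) (hsort : a.Pairwise (· ≤ ·)) (i j : Nat)
    (hij : i ≤ j) (hj : j < a.length) : a.getD i 0 ≤ a.getD j 0 := by
  rcases Nat.lt_or_ge i j with hlt | hge
  · have := (List.pairwise_iff_getElem.1 hsort) i j (by omega) hj hlt
    rw [List.getD_eq_getElem?_getD, List.getElem?_eq_getElem (by omega),
        List.getD_eq_getElem?_getD, List.getElem?_eq_getElem hj]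
    simpa using this
  · have : i = j := by omega
    rw [this]

lemma bleft_loop_spec (a : List Int) (x : Int) (hsort : a.Pairwise (· ≤ ·)) :
    ∀ (d lo hi : Nat), hi - lo = d → lo ≤ hi → hi ≤ a.length →
      (∀ i, i < lo → a.getD i 0 < x) →
      (∀ i, hi ≤ i → i < a.length → x ≤ a.getD i 0) →
      lo ≤ bleft_loop a x lo hi ∧ bleft_loop a x lo hi ≤ hi ∧
      (∀ i, i < bleft_loop a x lo hi → a.getD i 0 < x) ∧
      (∀ i, bleft_loop a x lo hi ≤ i → i < a.length → x ≤ a.getD i 0) := by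
  intro d
  induction d using Nat.strong_induction_on with
  | _ d ih =>
    intro lo hi hd hlh hhl hlo hhi
    rw [bleft_loop]
    by_cases h : lo < hi
    · rw [dif_pos h]
      simp only []
      set mid : Nat := (lo + hi) / 2 with hmid
      have hmlt : mid < hi := by omega
      have hmge : lo ≤ mid := by omega
      have hmlen : mid < a.length := by omega
      rw [show PySem.List.pyGetD a ((mid : Nat) : Int) 0 = a.getD mid 0 from PySem.List.pyGetD_natCast ..]
      by_cases hc : a.getD mid 0 < x
      · rw [if_pos hc]
        refine (ih (hi - (mid + 1)) (by omega) (mid + 1) hi rfl (by omega) hhl ?_ hhi).imp ?_ id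
        · intro i hi'
          calc a.getD i 0 ≤ a.getD mid 0 := sorted_getD_mono a hsort i mid (by omega) hmlen
            _ < x := hc
        · intro h'; omega
      · rw [if_neg hc]
        have h2 := ih (mid - lo) (by omega) lo mid rfl (by omega) (by omega) hlo ?_
        · exact ⟨h2.1, by omega, h2.2.2⟩
        · intro i hmi hil
          calc x ≤ a.getD mid 0 := by omega
            _ ≤ a.getD i 0 := sorted_getD_mono a hsort mid i hmi hil
    · rw [dif_neg h]
      have : lo = hi := by omega
      exact ⟨le_refl _, by omega, hlo, by rw [this]; exact hhi⟩

lemma bisect_left_spec (a : List Int) (x : Int) (hsort : a.Pairwise (· ≤ ·)) :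
    bisect_left a x ≤ a.length ∧
    (∀ i, i < bisect_left a x → a.getD i 0 < x) ∧
    (∀ i, bisect_left a x ≤ i → i < a.length → x ≤ a.getD i 0) := by
  have h := bleft_loop_spec a x hsort a.length 0 a.length (by omega) (by omega) (le_refl _)
    (by omega) (by intro i h1 h2; omega)
  exact ⟨h.2.1, h.2.2.1, h.2.2.2⟩

lemma mem_slice_bounds (a : List Int) (x y : Int) (hsort : a.Pairwise (· ≤ ·)) :
    ∀ j ∈ PySem.List.slice a (some ((bisect_left a x : Nat) : Int))
        (some ((bisect_left a y : Nat) : Int)), x ≤ j ∧ j < y := by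
  obtain ⟨hx1, hx2, hx3⟩ := bisect_left_spec a x hsort
  obtain ⟨hy1, hy2, hy3⟩ := bisect_left_spec a y hsort
  set lo := bisect_left a x
  set hi := bisect_left a y
  intro j hj
  rw [PySem.List.slice_natCast] at hj
  obtain ⟨i, hil, hieq⟩ := List.mem_iff_getElem.1 hj
  have hlen : (List.take (hi - lo) (List.drop lo a)).length = min (hi - lo) (a.length - lo) := by
    simp
  rw [List.getElem_take, List.getElem_drop] at hieq
  have hi2 : lo + i < a.length := by
    rw [hlen] at hil; omega
  have hi3 : lo + i < hi := by rw [hlen] at hil; omega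
  have hgd : a.getD (lo + i) 0 = j := by
    rw [List.getD_eq_getElem?_getD, List.getElem?_eq_getElem hi2]
    simpa using hieq
  constructor
  · have := hx3 (lo + i) (by omega) hi2
    omega
  · have := hy2 (lo + i) hi3
    omega

lemma count_slice_clip (a : List Int) (x y v : Int) (hsort : a.Pairwise (· ≤ ·))
    (hv1 : x ≤ v) (hv2 : v < y) :
    (PySem.List.slice a (some ((bisect_left a x : Nat) : Int))
        (some ((bisect_left a y : Nat) : Int))).count v = a.count v := by
  obtain ⟨hx1, hx2, hx3⟩ := bisect_left_spec a x hsort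
  obtain ⟨hy1, hy2, hy3⟩ := bisect_left_spec a y hsort
  set lo := bisect_left a x with hlo
  set hi := bisect_left a y with hhi
  have hlohi : lo ≤ hi := by
    by_contra hcon
    have h1 := hx2 hi (by omega)
    have h2 := hy3 hi (by omega) (by omega)
    omega
  rw [PySem.List.slice_natCast]
  have hdecomp : a = List.take lo a ++ (List.take (hi - lo) (List.drop lo a) ++ List.drop hi a) := by
    have h1 : List.drop hi a = List.drop (hi - lo) (List.drop lo a) := by
      rw [List.drop_drop]
      congr 1
      omega
    rw [h1, List.take_append_drop, List.take_append_drop]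
  conv_rhs => rw [hdecomp]
  rw [List.count_append, List.count_append]
  have hc1 : (List.take lo a).count v = 0 := by
    rw [List.count_eq_zero]
    intro hm
    obtain ⟨i, hil, hieq⟩ := List.mem_iff_getElem.1 hm
    rw [List.getElem_take] at hieq
    have hi2 : i < a.length := by simp at hil; omega
    have := hx2 i (by simp at hil; omega)
    rw [List.getD_eq_getElem?_getD, List.getElem?_eq_getElem hi2] at this
    simp at this hieq
    omega
  have hc3 : (List.drop hi a).count v = 0 := by
    rw [List.count_eq_zero]
    intro hm
    obtain ⟨i, hil, hieq⟩ := List.mem_iff_getElem.1 hm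
    rw [List.getElem_drop] at hieq
    have hi2 : hi + i < a.length := by simp at hil; omega
    have := hy3 (hi + i) (by omega) hi2
    rw [List.getD_eq_getElem?_getD, List.getElem?_eq_getElem hi2] at this
    simp at this hieq
    omega
  omega

def posList (l : List Char) (c : Char) : List Int :=
  (((PySem.List.enumerate l 0).filter (fun jc => jc.2 == c)).map (·.1))

lemma posList_nodup (l : List Char) (c : Char) : (posList l c).Nodup := by
  apply List.Nodup.sublist (List.Sublist.map _ (List.filter_sublist))
  rw [PySem.List.map_fst_enumerate]
  exact PySem.List.nodup_pyRange_one _ _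

lemma mem_posList (l : List Char) (c : Char) (q : Nat) :
    (q : Int) ∈ posList l c ↔ q < l.length ∧ l.getD q ' ' = c := by
  simp only [posList, List.mem_map, List.mem_filter, PySem.List.mem_enumerate_iff]
  constructor
  · rintro ⟨⟨a, b⟩, ⟨⟨k, hk, hp⟩, hb⟩, ha⟩
    obtain ⟨h1, h2⟩ := Prod.mk.injEq .. ▸ hp
    simp only at ha hb
    have hkq : k = q := by omega
    subst hkq h2
    refine ⟨hk, ?_⟩
    rw [List.getD_eq_getElem?_getD, List.getElem?_eq_getElem hk]
    simpa using hb
  · rintro ⟨hq, hc⟩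
    refine ⟨((q : Int), l.getD q ' '), ⟨⟨q, hq, ?_⟩, by simpa [List.getD_eq_getElem?_getD] using hc⟩, rfl⟩
    rw [List.getD_eq_getElem?_getD, List.getElem?_eq_getElem hq]
    simp

lemma posList_count (l : List Char) (c : Char) (q : Nat) :
    (posList l c).count ((q : Nat) : Int)
      = if q < l.length ∧ l.getD q ' ' = c then 1 else 0 := by
  split_ifs with h
  · exact List.count_eq_one_of_mem (posList_nodup l c) ((mem_posList l c q).2 h)
  · exact List.count_eq_zero_of_not_mem (fun hm => h ((mem_posList l c q).1 hm))

lemma pos_getD (l : List Char) (c : Char) :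
    (((PySem.List.enumerate l 0).foldl
        (fun d jc => d.modify jc.2 [] (· ++ [jc.1])) PySem.Dict.empty).getD c [])
      = posList l c := by
  have h : ((PySem.List.enumerate l 0).foldl
        (fun d jc => d.modify jc.2 [] (· ++ [jc.1])) (PySem.Dict.empty : PySem.Dict Char (List Int)))
      = (((PySem.List.enumerate l 0).map (fun jc => (jc.2, jc.1))).foldl
        (fun d p => d.modify p.1 [] (· ++ [p.2])) PySem.Dict.empty) := by
    rw [List.foldl_map]
  rw [h, PySem.Dict.getD_foldl_modify_append]
  simp only [posList, List.filter_map, List.map_map]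
  rfl

lemma posList_sorted (l : List Char) (c : Char) : (posList l c).Pairwise (· ≤ ·) := by
  unfold posList
  rw [List.pairwise_map]
  apply List.Pairwise.imp (fun {p q} h => le_of_lt h)
  exact List.Pairwise.filter _ (PySem.List.pairwise_lt_enumerate l 0)

def stepB (p : Int) (cs : List Int) (j : Int) : List Int :=
  cs.set (j - p).toNat (cs.getD (j - p).toNat 0 + 1)

lemma stepB_len (p : Int) (cs : List Int) (j : Int) : (stepB p cs j).length = cs.length := by
  unfold stepB; simp

lemma scatterB_len (p : Int) (os : List Int) (cs : List Int) :
    (os.foldl (stepB p) cs).length = cs.length := by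
  induction os generalizing cs with
  | nil => rfl
  | cons j rest ih => simp only [List.foldl_cons, ih, stepB_len]

lemma scatterB (width p : Int) (os : List Int) (cs : List Int) (k : Nat)
    (hk : (k : Int) < width) (hlen : cs.length = width.toNat)
    (hos : ∀ j ∈ os, p ≤ j ∧ j < p + width) :
    (os.foldl (stepB p) cs).getD k 0 = cs.getD k 0 + os.count ((k : Int) + p) := by
  induction os generalizing cs with
  | nil => simp
  | cons j rest ih =>
    simp only [List.foldl_cons]
    rw [ih _ (by rw [stepB_len]; exact hlen) (fun j hj => hos j (by simp [hj]))]
    rw [List.count_cons]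
    obtain ⟨hj1, hj2⟩ := hos j (by simp)
    by_cases hj : j = (k : Int) + p
    · subst hj
      have e : ((k : Int) + p) - p = (k : Int) := by ring
      have hkl : k < cs.length := by omega
      simp only [stepB, e, Int.toNat_natCast]
      rw [List.getD_eq_getElem?_getD, List.getElem?_set_self (by omega),
          List.getD_eq_getElem?_getD]
      simp only [beq_self_eq_true, if_pos]
      cases h : cs[k]? <;> simp <;> ring
    · simp only [stepB]
      have hcount : (if j == (k : Int) + p then 1 else 0) = 0 := by simp [hj]
      rw [hcount]
      have hne : (j - p).toNat ≠ k := by omega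
      rw [List.getD_eq_getElem?_getD, List.getElem?_set_ne hne, ← List.getD_eq_getElem?_getD]
      simp

def stepM (l : List Char) (width : Int) (cs : List Int) (pc : Int × Char) : List Int :=
  (PySem.List.slice (posList l pc.2)
      (some ((bisect_left (posList l pc.2) pc.1 : Nat) : Int))
      (some ((bisect_left (posList l pc.2) (pc.1 + width) : Nat) : Int))).foldl (stepB pc.1) cs

lemma middle_len (l : List Char) (width : Int) (s' : List Char) (st : Int) (cs : List Int) :
    ((PySem.List.enumerate s' st).foldl (stepM l width) cs).length = cs.length := by
  induction s' generalizing st cs with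
  | nil => rfl
  | cons c rest ih =>
    rw [PySem.List.enumerate_cons, List.foldl_cons, ih]
    exact scatterB_len _ _ _

lemma middle (l : List Char) (width : Int) (s' : List Char) (st : Nat) (cs : List Int) (k : Nat)
    (hk : (k : Int) < width) (hlen : cs.length = width.toNat) :
    ((PySem.List.enumerate s' (st : Int)).foldl (stepM l width) cs).getD k 0
      = cs.getD k 0
        + ((List.range s'.length).countP
            (fun p => decide (k + (st + p) < l.length ∧ l.getD (k + (st + p)) ' ' = s'.getD p ' ')) : Int) := by
  induction s' generalizing st cs with
  | nil => simp
  | cons c rest ih =>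
    rw [PySem.List.enumerate_cons, List.foldl_cons]
    have hcast : (st : Int) + 1 = ((st + 1 : Nat) : Int) := by push_cast; ring
    rw [hcast, ih (st + 1) _ (by unfold stepM; rw [scatterB_len]; exact hlen)]
    unfold stepM
    rw [scatterB width ((st : Nat) : Int) _ cs k hk hlen
      (fun j hj => mem_slice_bounds (posList l c) ((st : Nat) : Int) (((st : Nat) : Int) + width) (posList_sorted l c) j hj)]
    rw [count_slice_clip (posList l c) ((st : Nat) : Int) (((st : Nat) : Int) + width)
      ((k : Int) + ((st : Nat) : Int)) (posList_sorted l c) (by omega) (by omega)]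
    have hq : ((k + st : Nat) : Int) = (k : Int) + (st : Int) := by push_cast; ring
    rw [← hq, posList_count]
    simp only [List.length_cons]
    rw [List.range_succ_eq_map, List.countP_cons, List.countP_map]
    have hpred : ((fun p => decide (k + (st + p) < l.length ∧ l.getD (k + (st + p)) ' ' = (c :: rest).getD p ' ')) ∘ Nat.succ)
        = (fun p => decide (k + (st + 1 + p) < l.length ∧ l.getD (k + (st + 1 + p)) ' ' = rest.getD p ' ')) := by
      funext p
      simp only [Function.comp_apply, List.getD_cons_succ]
      have : k + (st + Nat.succ p) = k + (st + 1 + p) := by omega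
      rw [this]
    rw [hpred]
    have h0 : k + (st + 0) = k + st := by omega
    simp only [List.getD_cons_zero, h0]
    simp only [decide_eq_true_eq]
    by_cases hcond : k + st < l.length ∧ l.getD (k + st) ' ' = c
    · simp only [if_pos hcond]; push_cast; ring
    · simp only [if_neg hcond]; push_cast; ring


lemma counts_eq (l s : List Char) (h : s.length ≤ l.length) :
    (PySem.List.enumerate s 0).foldl (stepM l ((l.length : Int) - (s.length : Int) + 1))
        (List.replicate ((l.length : Int) - (s.length : Int) + 1).toNat 0)
      = cntList l s (l.length - s.length + 1) := by
  set width : Int := (l.length : Int) - (s.length : Int) + 1 with hw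
  have hwn : width.toNat = l.length - s.length + 1 := by omega
  apply List.ext_getElem
  · rw [middle_len, List.length_replicate, hwn]
    simp [cntList]
  · intro k h1 h2
    have hk1 : k < l.length - s.length + 1 := by
      rw [middle_len, List.length_replicate, hwn] at h1; exact h1
    have hkw : (k : Int) < width := by omega
    have hgd : ∀ (xs : List Int) (hkx : k < xs.length), xs[k] = xs.getD k 0 := by
      intro xs hkx
      rw [List.getD_eq_getElem?_getD, List.getElem?_eq_getElem hkx]
      rfl
    rw [hgd _ h1, hgd _ h2]
    have hm := middle l width s 0 (List.replicate width.toNat 0) k hkw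
      (by rw [List.length_replicate])
    norm_num at hm
    rw [List.getD_eq_getElem?_getD, hm]
    have hcnt : (List.range s.length).countP
        (fun p => decide (k + p < l.length) && decide (l[k + p]?.getD ' ' = s[p]?.getD ' '))
        = mcount l s k := by
      unfold mcount
      apply List.countP_congr
      intro p hp
      rw [List.mem_range] at hp
      have hlt : k + p < l.length := by omega
      simp [hlt, List.getD_eq_getElem?_getD]
    rw [hcnt]
    have : (cntList l s (l.length - s.length + 1)).getD k 0 = (mcount l s k : Int) := by
      unfold cntList
      rw [List.getD_eq_getElem?_getD, List.getElem?_eq_getElem (by simpa using hk1)]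
      simp
    rw [this]


-- ===== VERDICT (by name: the statement is the Claim_ definition above) =====
theorem find_homology_spec : Claim_equal_find_homology := by
  intro long_seq short_seq _
  unfold Spec_find_homology
  simp only [find_homology, find_homology_alt]
  set l := long_seq.toList with hl
  set s := short_seq.toList with hs
  by_cases hmn : s.length ≤ l.length
  case neg =>
    have hw : (l.length : Int) - (s.length : Int) + 1 ≤ 0 := by omega
    rw [if_pos hw, PySem.List.pyRange_one_eq_nil (by omega)]
    rfl
  case pos =>
    have hwpos : ¬ ((l.length : Int) - (s.length : Int) + 1 ≤ 0) := by omega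
    rw [if_neg hwpos]
    set W : Nat := l.length - s.length + 1 with hW
    have hcast : (l.length : Int) - (s.length : Int) + 1 = (W : Int) := by omega
    rw [hcast, PySem.List.pyRange_zero_natCast, List.foldl_map]
    rw [PySem.List.foldl_congr_mem _ _ (stepA l s) _ ?hstep]
    case hstep =>
      intro acc k hk
      rw [List.mem_range] at hk
      have hb : k + s.length ≤ l.length := by omega
      rw [inner_count l s k hb]
      by_cases hgt : (mcount l s k : Int) > acc.2
      · rw [if_pos hgt, inner_build l s k hb]
        unfold stepA
        rw [if_pos hgt]
      · rw [if_neg hgt]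
        unfold stepA
        rw [if_neg hgt]
    rw [A_loop l s W]
    have hcounts : (PySem.List.enumerate s 0).foldl (stepM l (W : Int))
        (List.replicate ((W : Int)).toNat 0) = cntList l s W := by
      rw [← hcast, hW]
      exact counts_eq l s hmn
    rw [PySem.List.foldl_congr_mem _ _ (stepM l (W : Int)) _ ?hstepB]
    case hstepB =>
      intro acc pc hpc
      unfold stepM stepB
      rw [pos_getD]
    rw [hcounts]
    have hne : cntList l s W ≠ [] := by
      apply List.ne_nil_of_length_pos
      simp [cntList]
      omega
    have hmax := max?_nonneg_list (cntList l s W) hne ?hnn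
    case hnn =>
      intro x hx
      simp only [cntList, List.mem_map] at hx
      obtain ⟨k, _, rfl⟩ := hx
      positivity
    rw [hmax]
    simp only []
    by_cases hM0 : (cntList l s W).foldl max 0 = 0
    · rw [if_pos hM0]
      unfold bigH
      rw [if_neg (by unfold bigM; omega)]
    · rw [if_neg hM0]
      have hMpos : 0 < bigM l s W := by
        have := bigM_nonneg l s W
        unfold bigM at *
        omega
      have hmem : bigM l s W ∈ cntList l s W := by
        rcases PySem.List.foldl_max_mem (cntList l s W) 0 with h0 | hm
        · exact absurd (show bigM l s W = 0 from h0) (by omega)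
        · exact hm
      have hsome : (PySem.List.index? (cntList l s W) (bigM l s W)).isSome := by
        rw [PySem.List.index?_isSome_iff]
        exact hmem
      obtain ⟨i, hi⟩ := Option.isSome_iff_exists.1 hsome
      unfold bigH
      rw [if_pos hMpos, hi]
      show String.ofList (window l s i) = _
      rw [show (cntList l s W).foldl max 0 = bigM l s W from rfl, hi]
      simp only []
      rw [PySem.List.slice_natCast_add]
      rfl
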